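-- pv_equiv track=rewrite | github.com/al-mong/algorithm_study | kwonmin/23_08/programmers/17684.py | solution
-- ===== SOURCE A (Python) =====
-- from collections import defaultdict
--
-- def solution(msg):
--     answer = []
--     idxs = defaultdict(int)
--
--     for i in range(26):
--         idxs[chr(ord('A')+i)] = i+1                 # A - Z 까지 값 초기화 (1부터 26)
--
--     now_idx = 27                                    # 그 다음으로 올 인덱스
--     now = 0                                         # 현재 포인터 위치
--     while now < len(msg):                           # 포인터가 범위 안에 있을 때 까지만
--         next = 1                                    # 탐색 범위 초기화
--         while now+next <= len(msg):                 # 탐색 범위가 msg 범위 안에 있도록 설정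
--             if idxs[msg[now:now+next]]:             # 다음 길이의 단어가 사전에 있으면
--                 next+=1                             # 탐색 범위 확장
--             else:
--                 break                               # w 탐색 종료
--         answer.append(idxs[msg[now:now+next-1]])    # 가장 긴 단어의 색인값 answer에 추가하기
--         idxs[msg[now:now+next]] = now_idx           # 가장 긴 단어 + 1 의 단어 색인에 추가하기
--         now_idx += 1                                # 다음 색인값 갱신
--         now = now + next - 1                        # 포인터 이동
--
--     return answer
-- ===== SOURCE B (Python) =====
-- def solution(msg):
--     # Trie-based LZW: walk the trie char-by-char instead of re-slicing and
--     # re-hashing substrings.  Trie nodes are named by their codes (root = the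
--     # empty word, code 0); child maps (node, char) to the extended word's node.
--     # Each round: emit the code of the longest prefix the trie knows, add one
--     # edge for that prefix plus the next character, continue at the match end.
--     child = {(0, chr(65 + k)): k + 1 for k in range(26)}
--     nxt = 27
--     answer = []
--     i, n = 0, len(msg)
--     while i < n:
--         v, j = 0, i
--         while j < n and (v, msg[j]) in child:
--             v = child[(v, msg[j])]
--             j += 1
--         answer.append(v)
--         if j < n:
--             child[(v, msg[j])] = nxt
--             nxt += 1
--         i = j
--     return answer
-- ===== Notes on version B (the rewrite author's own statement) =====
-- stated objective: alternative
-- what changed: Replaces A's substring dictionary with nested while-loops that re-slice and re-hash msg[now:now+next] at every probe by a trie walked char-by-char (nodes named by their codes, root = empty word with code 0), so each probe is one (node,char) lookup instead of hashing a fresh slice.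
import Mathlib
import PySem

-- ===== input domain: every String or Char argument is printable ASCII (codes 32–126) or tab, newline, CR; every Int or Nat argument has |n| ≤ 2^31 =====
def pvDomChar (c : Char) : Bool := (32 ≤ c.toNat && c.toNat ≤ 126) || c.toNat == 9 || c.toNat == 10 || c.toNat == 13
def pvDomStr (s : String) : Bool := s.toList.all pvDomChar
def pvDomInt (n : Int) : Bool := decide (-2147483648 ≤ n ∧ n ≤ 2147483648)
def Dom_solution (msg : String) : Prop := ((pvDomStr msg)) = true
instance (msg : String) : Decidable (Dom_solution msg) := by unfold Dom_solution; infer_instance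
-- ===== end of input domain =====

-- B replaces A's substring dictionary (nested while-loops re-slicing and re-hashing
-- msg[now:now+next] at every probe) by a trie walked char-by-char, nodes named by their codes
-- (root = empty word, code 0); the return values are proved equal on all inputs (both total).
-- Dictionary keys are represented as List Char (A) and Int × Char (B); A's defaultdict READ
-- idxs[k] is ported as getD k 0, exact for every value this program observes (the implicit
-- 0-valued key insertion it performs never changes any later getD result).

-- ===== PORT A =====

-- inner 'while now+next <= len(msg)' scan
def aScan (cs : List Char) (d : PySem.Dict (List Char) Int) (now next : Nat) : Nat :=
  if h : now + next ≤ cs.length then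
    if d.getD (PySem.List.slice cs (some (now : Int)) (some ((now + next : Nat) : Int))) 0 ≠ 0 then
      aScan cs d now (next + 1)
    else next
  else next
termination_by cs.length + 1 - (now + next)
decreasing_by exact Nat.sub_lt_sub_left (Nat.lt_succ_of_le h) (Nat.lt_succ_self _)

-- outer 'while now < len(msg)' loop. The fuel argument is a totality guard only: each
-- iteration either advances now or registers the current character so that the following
-- iteration advances, so 2*len(msg)+1 iterations are never exhausted.
def aLoop (cs : List Char) : Nat → PySem.Dict (List Char) Int → Int → Nat → List Int → List Int
  | 0, _, _, _, acc => acc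
  | fuel + 1, d, nowIdx, now, acc =>
    if now < cs.length then
      let next := aScan cs d now 1
      aLoop cs fuel
        (d.insert (PySem.List.slice cs (some (now : Int)) (some ((now + next : Nat) : Int))) nowIdx)
        (nowIdx + 1) (now + next - 1)
        (acc ++ [d.getD (PySem.List.slice cs (some (now : Int)) (some ((now + next - 1 : Nat) : Int))) 0])
    else acc

def solution (msg : String) : List Int :=
  let cs := msg.toList
  let d0 := (PySem.List.pyRange 0 26 1).foldl
    (fun d i => d.insert [Char.ofNat ('A'.toNat + i.toNat)] (i + 1)) PySem.Dict.empty
  aLoop cs (2 * cs.length + 1) d0 27 0 []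

-- ===== PORT B =====

-- inner 'while j < n and (v, msg[j]) in child' trie walk ('in' + lookup = one get?)
def bScan (cs : List Char) (child : PySem.Dict (Int × Char) Int) (v : Int) (j : Nat) : Int × Nat :=
  if h : j < cs.length then
    match child.get? (v, cs[j]) with
    | some u => bScan cs child u (j + 1)
    | none => (v, j)
  else (v, j)
termination_by cs.length - j

-- outer 'while i < n' loop; fuel is a totality guard only (each position is visited by at
-- most two iterations, so 2*len(msg)+1 iterations are never exhausted)
def bLoop (cs : List Char) : Nat → PySem.Dict (Int × Char) Int → Int → Nat → List Int → List Int
  | 0, _, _, _, acc => acc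
  | fuel + 1, child, nxt, i, acc =>
    if i < cs.length then
      let p := bScan cs child 0 i
      let acc' := acc ++ [p.1]
      if h : p.2 < cs.length then
        bLoop cs fuel (child.insert (p.1, cs[p.2]) nxt) (nxt + 1) p.2 acc'
      else bLoop cs fuel child nxt p.2 acc'
    else acc

def solution_alt (msg : String) : List Int :=
  let cs := msg.toList
  let child0 := (PySem.List.pyRange 0 26 1).foldl
    (fun d k => d.insert ((0 : Int), Char.ofNat (65 + k.toNat)) (k + 1)) PySem.Dict.empty
  bLoop cs (2 * cs.length + 1) child0 27 0 []

-- ===== PRECONDITION & SPEC =====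
def Spec_solution (msg : String) (out : List Int) : Prop := out = solution_alt msg
instance (msg : String) (out : List Int) : Decidable (Spec_solution msg out) := by unfold Spec_solution; infer_instance

-- ===== CLAIM (what is proved, stated in full; the proofs are below) =====
def Claim_equal_solution : Prop := ∀ (msg : String), Dom_solution msg → Spec_solution msg (solution msg)

-- ===== LEMMAS AND PROOFS =====

-- the word read along the trie from node v
def trieTrace (child : PySem.Dict (Int × Char) Int) : Int → List Char → Option Int
  | v, [] => some v
  | v, c :: rest =>
    match child.get? (v, c) with
    | some u => trieTrace child u rest
    | none => none

-- coupling invariant between A's substring dictionary and B's trie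
def DictInv (da : PySem.Dict (List Char) Int) (child : PySem.Dict (Int × Char) Int) (nxt : Int) : Prop :=
  (∀ s : List Char, da.getD s 0 = (trieTrace child 0 s).getD 0) ∧
  (∀ s t u, trieTrace child 0 s = some u → trieTrace child 0 t = some u → s = t) ∧
  (∀ k c u, child.get? (k, c) = some u → 0 ≤ k ∧ k < nxt ∧ 1 ≤ u ∧ u < nxt) ∧
  27 ≤ nxt

theorem trace_append (child : PySem.Dict (Int × Char) Int) (s t : List Char) :
    ∀ v, trieTrace child v (s ++ t) = (trieTrace child v s).bind (fun u => trieTrace child u t) := by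
  induction s with
  | nil => intro v; simp [trieTrace]
  | cons c rest ih =>
    intro v
    simp only [List.cons_append, trieTrace]
    cases child.get? (v, c) with
    | none => simp
    | some u => simpa using ih u

theorem trace_snoc (child : PySem.Dict (Int × Char) Int) (s : List Char) (c : Char) (v : Int) :
    trieTrace child v (s ++ [c]) = (trieTrace child v s).bind (fun u => child.get? (u, c)) := by
  rw [trace_append]
  cases trieTrace child v s with
  | none => rfl
  | some u =>
    simp only [Option.bind_some, trieTrace]
    cases child.get? (u, c) <;> rfl

theorem trace_pos {da : PySem.Dict (List Char) Int} {child : PySem.Dict (Int × Char) Int}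
    {nxt : Int} (hinv : DictInv da child nxt) (s : List Char) (hs : s ≠ []) (u : Int)
    (h : trieTrace child 0 s = some u) : 1 ≤ u ∧ u < nxt := by
  rcases List.eq_nil_or_concat s with rfl | ⟨t, c, rfl⟩
  · exact absurd rfl hs
  rw [List.concat_eq_append] at h
  rw [trace_snoc] at h
  cases ht : trieTrace child 0 t with
  | none => rw [ht] at h; simp at h
  | some w =>
    rw [ht] at h
    simp only [Option.bind_some] at h
    have := hinv.2.2.1 w c u h
    exact ⟨this.2.2.1, this.2.2.2⟩

-- inserting the edge for w ++ [c] changes exactly the trace of w ++ [c]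
theorem trace_insert {da : PySem.Dict (List Char) Int} {child : PySem.Dict (Int × Char) Int}
    {nxt : Int} (hinv : DictInv da child nxt) (w : List Char) (v' : Int) (c : Char)
    (hw : trieTrace child 0 w = some v') (hmiss : child.get? (v', c) = none) (s : List Char) :
    trieTrace (child.insert (v', c) nxt) 0 s
      = if s = w ++ [c] then some nxt else trieTrace child 0 s := by
  have hv' : v' < nxt := by
    have h27 := hinv.2.2.2
    by_cases hwn : w = []
    · subst hwn
      simp [trieTrace] at hw
      omega
    · exact (trace_pos hinv w hwn v' hw).2
  induction s using List.reverseRecOn with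
  | nil =>
    rw [if_neg (by simp)]
    rfl
  | append_singleton t d ih =>
    rw [trace_snoc, ih, trace_snoc]
    by_cases ht : t = w ++ [c]
    · subst ht
      rw [if_pos rfl]
      simp only [Option.bind_some]
      rw [PySem.Dict.get?_insert]
      rw [if_neg (by intro h; injection h with h1 _; omega)]
      have hnone : child.get? (nxt, d) = none := by
        cases hg : child.get? (nxt, d) with
        | none => rfl
        | some u => exact absurd (hinv.2.2.1 nxt d u hg).2.1 (by omega)
      rw [hnone]
      rw [if_neg (by simp)]
      rw [trace_snoc, hw]
      simp [hmiss]
    · rw [if_neg ht]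
      cases hu : trieTrace child 0 t with
      | none =>
        simp only [Option.bind_none]
        rw [if_neg (by
          intro h
          have h2 := List.append_inj' h rfl
          exact absurd (hu.symm.trans (h2.1 ▸ hw)).symm (by simp))]
      | some u =>
        simp only [Option.bind_some]
        rw [PySem.Dict.get?_insert]
        by_cases he : ((u, d) : Int × Char) = (v', c)
        · injection he with he1 he2
          subst he1; subst he2
          have htw : t = w := hinv.2.1 t w u hu hw
          subst htw
          rw [if_pos rfl, if_pos rfl]
        · rw [if_neg he]
          have hne : ¬ (t ++ [d] = w ++ [c]) := by
            intro h
            have h2 := List.append_inj' h rfl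
            have hdc : d = c := by
              have h22 := h2.2
              injection h22
            have htr2 : trieTrace child 0 t = some v' := by rw [h2.1]; exact hw
            rw [hu] at htr2
            injection htr2 with huv
            exact he (by rw [huv, hdc])
          rw [if_neg hne]

theorem inv_step {da : PySem.Dict (List Char) Int} {child : PySem.Dict (Int × Char) Int}
    {nxt : Int} (hinv : DictInv da child nxt) (w : List Char) (v' : Int) (c : Char)
    (hw : trieTrace child 0 w = some v') (hmiss : child.get? (v', c) = none) :
    DictInv (da.insert (w ++ [c]) nxt) (child.insert (v', c) nxt) (nxt + 1) := by
  have h27 := hinv.2.2.2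
  have hv0 : 0 ≤ v' ∧ v' < nxt := by
    by_cases hwn : w = []
    · subst hwn
      simp [trieTrace] at hw
      constructor <;> omega
    · have := trace_pos hinv w hwn v' hw
      constructor <;> omega
  refine ⟨fun s => ?_, fun s t u hs ht => ?_, fun k d u hg => ?_, by omega⟩
  · rw [PySem.Dict.getD_insert, trace_insert hinv w v' c hw hmiss]
    by_cases hsw : s = w ++ [c]
    · rw [if_pos hsw, if_pos hsw]; rfl
    · rw [if_neg hsw, if_neg hsw]; exact hinv.1 s
  · rw [trace_insert hinv w v' c hw hmiss] at hs ht
    split at hs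
    · split at ht
      · subst_vars; rfl
      · exfalso
        injection hs with hs
        subst hs
        by_cases htn : t = []
        · subst htn; simp [trieTrace] at ht; omega
        · exact absurd (trace_pos hinv t htn nxt ht).2 (by omega)
    · split at ht
      · exfalso
        injection ht with ht
        subst ht
        by_cases hsn : s = []
        · subst hsn; simp [trieTrace] at hs; omega
        · exact absurd (trace_pos hinv s hsn nxt hs).2 (by omega)
      · exact hinv.2.1 s t u hs ht
  · rw [PySem.Dict.get?_insert] at hg
    split at hg
    · injection hg with hg
      rename_i he
      injection he with he1 he2
      subst he1
      constructor
      · omega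
      constructor
      · omega
      constructor <;> omega
    · have := hinv.2.2.1 k d u hg
      refine ⟨this.1, by omega, this.2.2.1, by omega⟩

theorem take_drop_succ (cs : List Char) (i j : Nat) (hij : i ≤ j) (hj : j < cs.length) :
    (cs.drop i).take (j + 1 - i) = (cs.drop i).take (j - i) ++ [cs[j]] := by
  have h1 : j + 1 - i = (j - i) + 1 := by omega
  rw [h1, List.take_add_one]
  congr 1
  rw [List.getElem?_drop]
  have h2 : i + (j - i) = j := by omega
  rw [h2, List.getElem?_eq_getElem hj]
  rfl

theorem take_split (cs : List Char) (i k m : Nat) (h : k ≤ m) :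
    (cs.drop i).take m = (cs.drop i).take k ++ ((cs.drop (i + k)).take (m - k)) := by
  have : m = k + (m - k) := by omega
  rw [this, List.take_add, List.drop_drop]
  have : m - k = k + (m - k) - k := by omega
  rw [← this]

theorem bScan_out (cs : List Char) (child : PySem.Dict (Int × Char) Int) (i : Nat) :
    ∀ (j : Nat) (v : Int), i ≤ j → j ≤ cs.length →
    trieTrace child 0 ((cs.drop i).take (j - i)) = some v →
    ∃ v' j', bScan cs child v j = (v', j') ∧ j ≤ j' ∧ j' ≤ cs.length ∧
      trieTrace child 0 ((cs.drop i).take (j' - i)) = some v' ∧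
      (∀ h : j' < cs.length, child.get? (v', cs[j']) = none) := by
  intro j v hij hjl htr
  unfold bScan
  by_cases h : j < cs.length
  · rw [dif_pos h]
    cases hg : child.get? (v, cs[j]) with
    | none =>
      exact ⟨v, j, rfl, le_rfl, hjl, htr, fun _ => hg⟩
    | some u =>
      have htr' : trieTrace child 0 ((cs.drop i).take (j + 1 - i)) = some u := by
        rw [take_drop_succ cs i j hij h, trace_snoc, htr]
        simpa using hg
      obtain ⟨v', j', hb, h1, h2, h3, h4⟩ :=
        bScan_out cs child i (j + 1) u (by omega) (by omega) htr'
      exact ⟨v', j', hb, by omega, h2, h3, h4⟩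
  · rw [dif_neg h]
    exact ⟨v, j, rfl, le_rfl, hjl, htr, fun hlt => absurd hlt h⟩
termination_by j => cs.length - j
decreasing_by omega

theorem aScan_run (cs : List Char) (d : PySem.Dict (List Char) Int) (i : Nat) :
    ∀ (next m : Nat), 1 ≤ next → next ≤ m →
    (∀ k, next ≤ k → k < m → i + k ≤ cs.length ∧ d.getD ((cs.drop i).take k) 0 ≠ 0) →
    (cs.length < i + m ∨ d.getD ((cs.drop i).take m) 0 = 0) →
    aScan cs d i next = m := by
  intro next m h1 hm hmid hfin
  unfold aScan
  rw [PySem.List.slice_natCast]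
  have hkey : i + next - i = next := by omega
  rw [hkey]
  by_cases hle : i + next ≤ cs.length
  · rw [dif_pos hle]
    by_cases heq : next = m
    · subst heq
      rcases hfin with hbig | hzero
      · omega
      · rw [if_neg (by simpa using hzero)]
    · have hlt : next < m := by omega
      have := (hmid next le_rfl hlt).2
      rw [if_pos (by simpa using this)]
      exact aScan_run cs d i (next + 1) m (by omega) (by omega)
        (fun k hk1 hk2 => hmid k (by omega) hk2) hfin
  · rw [dif_neg hle]
    by_cases heq : next = m
    · exact heq
    · have hlt : next < m := by omega
      have := (hmid next le_rfl hlt).1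
      omega
termination_by next m _ _ _ _ => m - next

theorem aLoop_stop (cs : List Char) (fuel : Nat) (d : PySem.Dict (List Char) Int) (x : Int)
    (now : Nat) (acc : List Int) (h : ¬ now < cs.length) :
    aLoop cs fuel d x now acc = acc := by
  cases fuel <;> simp [aLoop, h]

theorem bLoop_stop (cs : List Char) (fuel : Nat) (child : PySem.Dict (Int × Char) Int) (x : Int)
    (i : Nat) (acc : List Int) (h : ¬ i < cs.length) :
    bLoop cs fuel child x i acc = acc := by
  cases fuel <;> simp [bLoop, h]

-- lockstep simulation of the two outer loops
theorem loop_eq (cs : List Char) :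
    ∀ (fuel : Nat) (i : Nat) (da : PySem.Dict (List Char) Int)
      (child : PySem.Dict (Int × Char) Int) (nxt : Int) (acc : List Int),
    i ≤ cs.length → DictInv da child nxt →
    aLoop cs fuel da nxt i acc = bLoop cs fuel child nxt i acc := by
  intro fuel
  induction fuel with
  | zero => intro i da child nxt acc _ _; rfl
  | succ fuel ih =>
    intro i da child nxt acc hil hinv
    by_cases hi : i < cs.length
    · have htr0 : trieTrace child 0 ((cs.drop i).take (i - i)) = some 0 := by
        rw [Nat.sub_self, List.take_zero]
        rfl
      obtain ⟨v', j', hb, hjj, hjl, htr, hend⟩ :=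
        bScan_out cs child i i 0 le_rfl (by omega) htr0
      have hval : ∀ k, 1 ≤ k → i + k ≤ j' →
          ∃ y, trieTrace child 0 ((cs.drop i).take k) = some y ∧ 1 ≤ y := by
        intro k hk1 hk2
        have hsplit := take_split cs i k (j' - i) (by omega)
        rw [hsplit, trace_append] at htr
        cases hy : trieTrace child 0 ((cs.drop i).take k) with
        | none => rw [hy] at htr; simp at htr
        | some y =>
          refine ⟨y, rfl, ?_⟩
          have hne : (cs.drop i).take k ≠ [] := by
            intro hnil
            have := congrArg List.length hnil
            simp only [List.length_take, List.length_drop, List.length_nil] at this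
            omega
          exact (trace_pos hinv _ hne y hy).1
      have hscan : aScan cs da i 1 = j' - i + 1 := by
        apply aScan_run
        · omega
        · omega
        · intro k hk1 hk2
          refine ⟨by omega, ?_⟩
          obtain ⟨y, hy, hy1⟩ := hval k hk1 (by omega)
          rw [hinv.1, hy]
          simp
          omega
        · by_cases hjn : j' < cs.length
          · right
            have e : j' - i + 1 = j' + 1 - i := by omega
            rw [e, take_drop_succ cs i j' (by omega) hjn]
            rw [hinv.1, trace_snoc, htr]
            simp [hend hjn]
          · left; omega
      -- unfold one iteration of each loop
      simp only [aLoop, bLoop]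
      rw [if_pos hi, if_pos hi, hb]
      simp only [hscan]
      have e1 : i + (j' - i + 1) - 1 = j' := by omega
      have e2 : i + (j' - i + 1) = j' + 1 := by omega
      rw [e1, e2, PySem.List.slice_natCast, PySem.List.slice_natCast]
      have hemit : da.getD (List.take (j' - i) (List.drop i cs)) 0 = v' := by
        rw [hinv.1, htr]
        rfl
      rw [hemit]
      by_cases hjn : j' < cs.length
      · rw [dif_pos hjn]
        rw [show List.take (j' + 1 - i) (List.drop i cs)
              = (cs.drop i).take (j' - i) ++ [cs[j']] from take_drop_succ cs i j' (by omega) hjn]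
        exact ih j' _ _ _ _ (by omega) (inv_step hinv _ v' cs[j'] htr (hend hjn))
      · rw [dif_neg hjn]
        have hje : j' = cs.length := by omega
        rw [aLoop_stop cs fuel _ _ _ _ (by omega), bLoop_stop cs fuel _ _ _ _ (by omega)]
    · simp only [aLoop, bLoop]
      rw [if_neg hi, if_neg hi]

-- initial dictionaries: item lists and key characterizations
theorem init_items_a :
    ((PySem.List.pyRange 0 26 1).foldl
      (fun d i => d.insert [Char.ofNat ('A'.toNat + i.toNat)] (i + 1)) PySem.Dict.empty).items
    = (PySem.List.pyRange 0 26 1).map (fun i => ([Char.ofNat ('A'.toNat + i.toNat)], i + 1)) := by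
  have h := PySem.Dict.items_foldl_insert_fresh (d := (PySem.Dict.empty : PySem.Dict (List Char) Int))
    (l := PySem.List.pyRange 0 26 1)
    (k := fun i => [Char.ofNat ('A'.toNat + i.toNat)]) (v := fun i => i + 1)
    (by decide) (by decide)
  simpa using h
theorem init_items_b :
    ((PySem.List.pyRange 0 26 1).foldl
      (fun d k => d.insert ((0 : Int), Char.ofNat (65 + k.toNat)) (k + 1)) PySem.Dict.empty).items
    = (PySem.List.pyRange 0 26 1).map (fun k => (((0 : Int), Char.ofNat (65 + k.toNat)), k + 1)) := by
  have h := PySem.Dict.items_foldl_insert_fresh (d := (PySem.Dict.empty : PySem.Dict (Int × Char) Int))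
    (l := PySem.List.pyRange 0 26 1)
    (k := fun k => ((0 : Int), Char.ofNat (65 + k.toNat))) (v := fun k => k + 1)
    (by decide) (by decide)
  simpa using h

theorem init_get_a (s : List Char) (u : Int) :
    ((PySem.List.pyRange 0 26 1).foldl
      (fun d i => d.insert [Char.ofNat ('A'.toNat + i.toNat)] (i + 1)) PySem.Dict.empty).get? s
      = some u ↔ ∃ a ∈ PySem.List.pyRange 0 26 1, s = [Char.ofNat ('A'.toNat + a.toNat)] ∧ u = a + 1 := by
  rw [PySem.Dict.get?_eq_some_iff_mem_items _ _ _ (by decide), init_items_a, List.mem_map]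
  constructor
  · rintro ⟨a, ha, he⟩
    injection he with h1 h2
    exact ⟨a, ha, h1.symm, h2.symm⟩
  · rintro ⟨a, ha, h1, h2⟩
    exact ⟨a, ha, by rw [h1, h2]⟩

theorem init_get_b (p : Int × Char) (u : Int) :
    ((PySem.List.pyRange 0 26 1).foldl
      (fun d k => d.insert ((0 : Int), Char.ofNat (65 + k.toNat)) (k + 1)) PySem.Dict.empty).get? p
      = some u ↔ ∃ a ∈ PySem.List.pyRange 0 26 1, p = ((0 : Int), Char.ofNat (65 + a.toNat)) ∧ u = a + 1 := by
  rw [PySem.Dict.get?_eq_some_iff_mem_items _ _ _ (by decide), init_items_b, List.mem_map]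
  constructor
  · rintro ⟨a, ha, he⟩
    injection he with h1 h2
    exact ⟨a, ha, h1.symm, h2.symm⟩
  · rintro ⟨a, ha, h1, h2⟩
    exact ⟨a, ha, by rw [h1, h2]⟩

theorem mem_pyRange26 (a : Int) (h : a ∈ PySem.List.pyRange 0 26 1) : 0 ≤ a ∧ a < 26 := by
  have : ∀ x ∈ PySem.List.pyRange 0 26 1, 0 ≤ x ∧ x < 26 := by decide
  exact this a h

theorem init_inv :
    DictInv ((PySem.List.pyRange 0 26 1).foldl
          (fun d i => d.insert [Char.ofNat ('A'.toNat + i.toNat)] (i + 1)) PySem.Dict.empty)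
        ((PySem.List.pyRange 0 26 1).foldl
          (fun d k => d.insert ((0 : Int), Char.ofNat (65 + k.toNat)) (k + 1)) PySem.Dict.empty)
        27 := by
  refine ⟨fun s => ?_, fun s t u hs ht => ?_, fun k c u hg => ?_, le_refl 27⟩
  · -- value correspondence
    match s with
    | [] =>
      have hna : ∀ u : Int, ¬ ((PySem.List.pyRange 0 26 1).foldl
          (fun d i => d.insert [Char.ofNat ('A'.toNat + i.toNat)] (i + 1))
          PySem.Dict.empty).get? ([] : List Char) = some u := by
        intro u h
        obtain ⟨a, _, h1, _⟩ := (init_get_a [] u).mp h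
        simp at h1
      rw [PySem.Dict.getD_eq_get?_getD]
      cases hg : ((PySem.List.pyRange 0 26 1).foldl
          (fun d i => d.insert [Char.ofNat ('A'.toNat + i.toNat)] (i + 1))
          PySem.Dict.empty).get? ([] : List Char) with
      | none => rfl
      | some u => exact absurd hg (hna u)
    | [c] =>
      simp only [trieTrace]
      rw [PySem.Dict.getD_eq_get?_getD]
      cases hgb : ((PySem.List.pyRange 0 26 1).foldl
          (fun d k => d.insert ((0 : Int), Char.ofNat (65 + k.toNat)) (k + 1))
          PySem.Dict.empty).get? ((0 : Int), c) with
      | some u =>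
        obtain ⟨a, ha, h1, h2⟩ := (init_get_b _ u).mp hgb
        injection h1 with _ h1c
        have hga : ((PySem.List.pyRange 0 26 1).foldl
            (fun d i => d.insert [Char.ofNat ('A'.toNat + i.toNat)] (i + 1))
            PySem.Dict.empty).get? [c] = some (a + 1) := by
          rw [init_get_a]
          exact ⟨a, ha, by rw [h1c]; rfl, rfl⟩
        rw [hga, h2]
      | none =>
        cases hga : ((PySem.List.pyRange 0 26 1).foldl
            (fun d i => d.insert [Char.ofNat ('A'.toNat + i.toNat)] (i + 1))
            PySem.Dict.empty).get? [c] with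
        | none => rfl
        | some u =>
          obtain ⟨a, ha, h1, h2⟩ := (init_get_a _ u).mp hga
          injection h1 with h1c _
          have : ((PySem.List.pyRange 0 26 1).foldl
              (fun d k => d.insert ((0 : Int), Char.ofNat (65 + k.toNat)) (k + 1))
              PySem.Dict.empty).get? ((0 : Int), c) = some (a + 1) := by
            rw [init_get_b]
            exact ⟨a, ha, by rw [h1c]; rfl, rfl⟩
          rw [this] at hgb
          cases hgb
    | c :: d :: t =>
      simp only [trieTrace]
      have hna : ∀ u : Int, ¬ ((PySem.List.pyRange 0 26 1).foldl
          (fun d i => d.insert [Char.ofNat ('A'.toNat + i.toNat)] (i + 1))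
          PySem.Dict.empty).get? (c :: d :: t) = some u := by
        intro u h
        obtain ⟨a, _, h1, _⟩ := (init_get_a _ u).mp h
        simp at h1
      have hda0 : ((PySem.List.pyRange 0 26 1).foldl
          (fun d i => d.insert [Char.ofNat ('A'.toNat + i.toNat)] (i + 1))
          PySem.Dict.empty).getD (c :: d :: t) 0 = 0 := by
        rw [PySem.Dict.getD_eq_get?_getD]
        cases hg : ((PySem.List.pyRange 0 26 1).foldl
            (fun d i => d.insert [Char.ofNat ('A'.toNat + i.toNat)] (i + 1))
            PySem.Dict.empty).get? (c :: d :: t) with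
        | none => rfl
        | some u => exact absurd hg (hna u)
      rw [hda0]
      cases hg1 : ((PySem.List.pyRange 0 26 1).foldl
          (fun d k => d.insert ((0 : Int), Char.ofNat (65 + k.toNat)) (k + 1))
          PySem.Dict.empty).get? ((0 : Int), c) with
      | none => rfl
      | some u =>
        obtain ⟨a, ha, _, h2⟩ := (init_get_b _ u).mp hg1
        have hu : 1 ≤ u := by
          have := mem_pyRange26 a ha
          omega
        simp only [trieTrace]
        cases hg2 : ((PySem.List.pyRange 0 26 1).foldl
            (fun d k => d.insert ((0 : Int), Char.ofNat (65 + k.toNat)) (k + 1))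
            PySem.Dict.empty).get? (u, d) with
        | none => rfl
        | some u2 =>
          obtain ⟨b, _, h1, _⟩ := (init_get_b _ u2).mp hg2
          injection h1 with h1u _
          omega
  · -- injectivity
    match s, t with
    | [], [] => rfl
    | [], c :: t' =>
      exfalso
      simp only [trieTrace] at hs ht
      injection hs with hs
      subst hs
      cases hg : ((PySem.List.pyRange 0 26 1).foldl
          (fun d k => d.insert ((0 : Int), Char.ofNat (65 + k.toNat)) (k + 1))
          PySem.Dict.empty).get? ((0 : Int), c) with
      | none => rw [hg] at ht; cases ht
      | some u1 =>
        rw [hg] at ht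
        obtain ⟨a, ha, _, h2⟩ := (init_get_b _ u1).mp hg
        have ha26 := mem_pyRange26 a ha
        match t' with
        | [] =>
          simp only [trieTrace] at ht
          injection ht with ht
          omega
        | d :: t'' =>
          simp only [trieTrace] at ht
          cases hg2 : ((PySem.List.pyRange 0 26 1).foldl
              (fun d k => d.insert ((0 : Int), Char.ofNat (65 + k.toNat)) (k + 1))
              PySem.Dict.empty).get? (u1, d) with
          | none => rw [hg2] at ht; cases ht
          | some u2 =>
            obtain ⟨b, _, h1, _⟩ := (init_get_b _ u2).mp hg2
            injection h1 with h1u _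
            omega
    | c :: s', [] =>
      exfalso
      simp only [trieTrace] at hs ht
      injection ht with ht
      subst ht
      cases hg : ((PySem.List.pyRange 0 26 1).foldl
          (fun d k => d.insert ((0 : Int), Char.ofNat (65 + k.toNat)) (k + 1))
          PySem.Dict.empty).get? ((0 : Int), c) with
      | none => rw [hg] at hs; cases hs
      | some u1 =>
        rw [hg] at hs
        obtain ⟨a, ha, _, h2⟩ := (init_get_b _ u1).mp hg
        have ha26 := mem_pyRange26 a ha
        match s' with
        | [] =>
          simp only [trieTrace] at hs
          injection hs with hs
          omega
        | d :: s'' =>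
          simp only [trieTrace] at hs
          cases hg2 : ((PySem.List.pyRange 0 26 1).foldl
              (fun d k => d.insert ((0 : Int), Char.ofNat (65 + k.toNat)) (k + 1))
              PySem.Dict.empty).get? (u1, d) with
          | none => rw [hg2] at hs; cases hs
          | some u2 =>
            obtain ⟨b, _, h1, _⟩ := (init_get_b _ u2).mp hg2
            injection h1 with h1u _
            omega
    | c :: s', d :: t' =>
      simp only [trieTrace] at hs ht
      cases hg1 : ((PySem.List.pyRange 0 26 1).foldl
          (fun d k => d.insert ((0 : Int), Char.ofNat (65 + k.toNat)) (k + 1))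
          PySem.Dict.empty).get? ((0 : Int), c) with
      | none => rw [hg1] at hs; cases hs
      | some u1 =>
        rw [hg1] at hs
        obtain ⟨a, ha, hac, hau⟩ := (init_get_b _ u1).mp hg1
        have ha26 := mem_pyRange26 a ha
        cases hg2 : ((PySem.List.pyRange 0 26 1).foldl
            (fun d k => d.insert ((0 : Int), Char.ofNat (65 + k.toNat)) (k + 1))
            PySem.Dict.empty).get? ((0 : Int), d) with
        | none => rw [hg2] at ht; cases ht
        | some u2 =>
          rw [hg2] at ht
          obtain ⟨b, hb, hbc, hbu⟩ := (init_get_b _ u2).mp hg2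
          have hb26 := mem_pyRange26 b hb
          -- deeper edges do not exist, so s' = t' = []
          have hs' : s' = [] := by
            match s', hs with
            | [], _ => rfl
            | e :: s'', hs =>
              exfalso
              simp only [trieTrace] at hs
              cases hg3 : ((PySem.List.pyRange 0 26 1).foldl
                  (fun d k => d.insert ((0 : Int), Char.ofNat (65 + k.toNat)) (k + 1))
                  PySem.Dict.empty).get? (u1, e) with
              | none => rw [hg3] at hs; cases hs
              | some u3 =>
                obtain ⟨x, _, h1, _⟩ := (init_get_b _ u3).mp hg3
                injection h1 with h1u _
                omega
          have ht' : t' = [] := by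
            match t', ht with
            | [], _ => rfl
            | e :: t'', ht =>
              exfalso
              simp only [trieTrace] at ht
              cases hg3 : ((PySem.List.pyRange 0 26 1).foldl
                  (fun d k => d.insert ((0 : Int), Char.ofNat (65 + k.toNat)) (k + 1))
                  PySem.Dict.empty).get? (u2, e) with
              | none => rw [hg3] at ht; cases ht
              | some u3 =>
                obtain ⟨x, _, h1, _⟩ := (init_get_b _ u3).mp hg3
                injection h1 with h1u _
                omega
          subst hs'
          subst ht'
          simp only [trieTrace] at hs ht
          injection hs with hs
          injection ht with ht
          subst hs
          subst ht
          have hab : a = b := by omega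
          injection hac with _ hac2
          injection hbc with _ hbc2
          rw [hac2, hbc2, hab]
  · -- edge bounds
    obtain ⟨a, ha, h1, h2⟩ := (init_get_b _ u).mp hg
    have := mem_pyRange26 a ha
    injection h1 with h1k _
    refine ⟨by omega, by omega, by omega, by omega⟩

theorem solution_eq_alt (msg : String) : solution msg = solution_alt msg := by
  unfold solution solution_alt
  exact loop_eq msg.toList (2 * msg.toList.length + 1) 0 _ _ 27 [] (Nat.zero_le _) init_inv

-- ===== VERDICT (by name: the statement is the Claim_ definition above) =====
theorem solution_spec : Claim_equal_solution := by
  intro msg _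
  exact solution_eq_alt msg
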